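-- pv_equiv track=rewrite | github.com/aloofzebra03/Agentic-AI-For-Education | simulation_to_concept/quiz_rules.py | get_hint_for_attempt
-- ===== SOURCE A (Python) =====
-- def get_hint_for_attempt(hints: dict, attempt_number: int) -> str:
--     """
--     Get appropriate hint based on attempt number.
--
--     Args:
--         hints: Dictionary of hints with keys like "attempt_1", "attempt_2", "attempt_3"
--         attempt_number: Current attempt number (1-based)
--
--     Returns:
--         str: Appropriate hint for this attempt, or last available hint
--     """
--     if not hints:
--         return ""
--
--     # Try to get hint for this specific attempt
--     hint_key = f"attempt_{attempt_number}"
--     if hint_key in hints: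
--         return hints[hint_key]
--
--     # Fall back to highest available attempt hint
--     for i in range(attempt_number, 0, -1):
--         key = f"attempt_{i}"
--         if key in hints:
--             return hints[key]
--
--     # Last resort: return first available hint
--     return next(iter(hints.values()), "")
-- ===== SOURCE B (Python) =====
-- def _attempt_number(key):
--     """The N of a key of the canonical form 'attempt_N' (N a positive decimal
--     number, no leading zeros), or None for any other key."""
--     if not key.startswith("attempt_"):
--         return None
--     suffix = key[len("attempt_"):]
--     if not suffix.isdigit() or suffix.startswith("0"):
--         return None
--     return int(suffix)
--
--
-- def get_hint_for_attempt(hints: dict, attempt_number: int) -> str: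
--     if not hints:
--         return ""
--     best_n, best_hint = 0, None
--     for key, hint in hints.items():
--         n = _attempt_number(key)
--         if n is not None and best_n < n <= attempt_number:
--             best_n, best_hint = n, hint
--     if best_hint is not None:
--         return best_hint
--     return next(iter(hints.values()))
-- ===== Notes on version B (the rewrite author's own statement) =====
-- stated objective: alternative
-- what changed: Replaces A's direct lookup plus descending membership-probe loop (one dict probe per candidate attempt number, up to attempt_number of them) by a single forward scan over hints.items() that reads each canonical 'attempt_N' key's number and keeps the hint of the largest N not exceeding attempt_number.
-- intended difference: For non-positive attempt numbers (the parameter is documented 1-based) whose exact key, e.g. 'attempt_0' or 'attempt_-2', happens to be present with a hint different from the dict's first hint, A's literal key lookup returns that hint while B treats such an attempt as having no matching hint and returns the first available hint, the intended last-resort fallback. — e.g. on get_hint_for_attempt([("intro", "first"), ("attempt_0", "zero")], 0): A returns "zero", B returns "first"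
import Mathlib
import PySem

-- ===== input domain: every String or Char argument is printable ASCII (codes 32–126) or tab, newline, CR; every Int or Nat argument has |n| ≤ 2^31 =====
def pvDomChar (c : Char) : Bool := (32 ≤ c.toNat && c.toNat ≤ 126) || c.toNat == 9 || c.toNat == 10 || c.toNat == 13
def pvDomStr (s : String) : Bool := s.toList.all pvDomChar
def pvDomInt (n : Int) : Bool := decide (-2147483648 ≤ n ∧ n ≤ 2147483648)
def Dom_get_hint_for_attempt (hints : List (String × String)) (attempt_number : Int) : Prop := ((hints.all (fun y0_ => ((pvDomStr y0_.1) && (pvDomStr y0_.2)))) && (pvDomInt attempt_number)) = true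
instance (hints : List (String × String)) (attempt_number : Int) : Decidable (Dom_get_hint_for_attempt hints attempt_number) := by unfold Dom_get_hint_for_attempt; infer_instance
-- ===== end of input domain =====

-- B replaces A's direct lookup plus descending membership-probe loop by a single
-- forward scan over hints.items() that keeps the hint of the largest canonical
-- 'attempt_N' key with N ≤ attempt_number (an argmax pass).

-- ===== PORT A =====
-- f"attempt_{i}"
def pvKey (i : Int) : String := "attempt_" ++ PySem.Int.toStr i

-- `for i in range(attempt_number, 0, -1): key = f"attempt_{i}"; if key in hints: return hints[key]`
def pvALoop (hints : List (String × String)) : List Int → Option String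
  | [] => none
  | i :: rest =>
    match hints.lookup (pvKey i) with
    | some v => some v
    | none => pvALoop hints rest

def get_hint_for_attempt (hints : List (String × String)) (attempt_number : Int) : String :=
  if hints = [] then ""                               -- if not hints: return ""
  else
    -- hint_key = f"attempt_{attempt_number}"; if hint_key in hints: return hints[hint_key]
    match hints.lookup (pvKey attempt_number) with
    | some v => v
    | none =>
      match pvALoop hints (PySem.List.pyRange attempt_number 0 (-1)) with
      | some v => v
      | none =>
        -- return next(iter(hints.values()), "")
        match hints with
        | [] => ""
        | (_, v) :: _ => v

-- ===== PORT B =====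
-- int(suffix) as called by _attempt_number: suffix is a nonempty string of ASCII
-- digits there, where Python's int() is exactly this left fold
def pvIntOfDigits (ds : List Char) : Int :=
  ds.foldl (fun a c => 10 * a + ((c.toNat : Int) - 48)) 0

-- _attempt_number(key)
def pvAttemptNumber (key : String) : Option Int :=
  if PySem.Str.startswith key "attempt_" then
    let suffix := PySem.Str.slice key (some 8) none   -- key[len("attempt_"):]
    if ¬ (PySem.Str.strIsdigit suffix = true) ∨ PySem.Str.startswith suffix "0" = true then
      none
    else
      some (pvIntOfDigits suffix.toList)              -- return int(suffix)
  else none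

-- the for-loop over hints.items() carrying (best_n, best_hint)
def pvBLoop (attempt_number : Int) :
    List (String × String) → Int × Option String → Int × Option String
  | [], st => st
  | (key, hint) :: rest, (bn, bh) =>
    match pvAttemptNumber key with
    | some n =>
      if bn < n ∧ n ≤ attempt_number then pvBLoop attempt_number rest (n, some hint)
      else pvBLoop attempt_number rest (bn, bh)
    | none => pvBLoop attempt_number rest (bn, bh)

def get_hint_for_attempt_alt (hints : List (String × String)) (attempt_number : Int) : String :=
  if hints = [] then ""                               -- if not hints: return ""
  else
    match pvBLoop attempt_number hints (0, none) with
    | (_, some h) => h                                -- if best_hint is not None: return best_hint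
    | (_, none) =>
      match hints with                                -- return next(iter(hints.values()))
      | [] => ""
      | (_, v) :: _ => v

-- ===== PRECONDITION & SPEC =====
-- For non-positive attempt numbers (the parameter is documented 1-based) whose exact
-- key, e.g. 'attempt_0' or 'attempt_-2', happens to be present with a hint different
-- from the dict's first hint, A's literal key lookup returns that hint while B treats
-- such an attempt as having no matching hint and returns the first available hint,
-- the intended last-resort fallback.
def D_get_hint_for_attempt (hints : List (String × String)) (attempt_number : Int) : Prop :=
  attempt_number < 1 ∧
  (hints.lookup ("attempt_" ++ PySem.Int.toStr attempt_number)).isSome = true ∧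
  hints.lookup ("attempt_" ++ PySem.Int.toStr attempt_number) ≠ hints.head?.map Prod.snd
instance (hints : List (String × String)) (attempt_number : Int) : Decidable (D_get_hint_for_attempt hints attempt_number) := by unfold D_get_hint_for_attempt; infer_instance

def Spec_get_hint_for_attempt (hints : List (String × String)) (attempt_number : Int) (out : String) : Prop := ¬ D_get_hint_for_attempt hints attempt_number → out = get_hint_for_attempt_alt hints attempt_number
instance (hints : List (String × String)) (attempt_number : Int) (out : String) : Decidable (Spec_get_hint_for_attempt hints attempt_number out) := by unfold Spec_get_hint_for_attempt; infer_instance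

def pvDiffWitness_get_hint_for_attempt : (List (String × String)) × Int :=
  ([("intro", "first"), ("attempt_0", "zero")], 0)
def pvDiffWitnessOut_get_hint_for_attempt : String × String := ("zero", "first")

-- ===== CLAIM (what is proved, stated in full; the proofs are below) =====
def Claim_unchanged_get_hint_for_attempt : Prop := ∀ (hints : List (String × String)) (attempt_number : Int), Dom_get_hint_for_attempt hints attempt_number → Spec_get_hint_for_attempt hints attempt_number (get_hint_for_attempt hints attempt_number)
def Claim_changed_get_hint_for_attempt : Prop := Dom_get_hint_for_attempt (pvDiffWitness_get_hint_for_attempt.1) (pvDiffWitness_get_hint_for_attempt.2) ∧ D_get_hint_for_attempt (pvDiffWitness_get_hint_for_attempt.1) (pvDiffWitness_get_hint_for_attempt.2) ∧ get_hint_for_attempt (pvDiffWitness_get_hint_for_attempt.1) (pvDiffWitness_get_hint_for_attempt.2) = pvDiffWitnessOut_get_hint_for_attempt.1 ∧ get_hint_for_attempt_alt (pvDiffWitness_get_hint_for_attempt.1) (pvDiffWitness_get_hint_for_attempt.2) = pvDiffWitnessOut_get_hint_for_attempt.2 ∧ pvDiffWitnessOut_get_hint_for_attempt.1 ≠ pv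DiffWitnessOut_get_hint_for_attempt.2
def Claim_exact_get_hint_for_attempt : Prop := ∀ (hints : List (String × String)) (attempt_number : Int), Dom_get_hint_for_attempt hints attempt_number → D_get_hint_for_attempt hints attempt_number → get_hint_for_attempt hints attempt_number ≠ get_hint_for_attempt_alt hints attempt_number

-- ===== LEMMAS AND PROOFS =====

/- ---------- decimal rendering: characterisation of Nat.toDigits 10 ---------- -/

def pvSpecDigits (n : Nat) : List Char :=
  if _h : n < 10 then [Nat.digitChar n]
  else pvSpecDigits (n / 10) ++ [Nat.digitChar (n % 10)]
decreasing_by exact Nat.div_lt_self (by omega) (by omega)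

theorem pvToDigitsCore_eq (f : Nat) : ∀ (n : Nat) (acc : List Char), n < f →
    Nat.toDigitsCore 10 f n acc = pvSpecDigits n ++ acc := by
  induction f with
  | zero => intro n acc h; omega
  | succ f ih =>
    intro n acc h
    rw [Nat.toDigitsCore]
    by_cases h10 : n / 10 = 0
    · have hn : n < 10 := by omega
      simp only [h10]
      rw [pvSpecDigits, dif_pos hn, Nat.mod_eq_of_lt hn]
      simp
    · have hn : ¬ n < 10 := by
        intro hc; exact h10 (Nat.div_eq_of_lt hc)
      simp only [if_neg h10]
      rw [ih (n / 10) _ (by have := Nat.div_lt_self (n := n) (by omega) (by omega : (1:Nat) < 10); omega)]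
      conv_rhs => rw [pvSpecDigits, dif_neg hn]
      simp

theorem pvToDigits_eq (n : Nat) : Nat.toDigits 10 n = pvSpecDigits n := by
  rw [Nat.toDigits, pvToDigitsCore_eq (n + 1) n [] (by omega)]
  simp

theorem pvDigitChar_facts (d : Nat) (h : d < 10) :
    '0' ≤ Nat.digitChar d ∧ Nat.digitChar d ≤ '9' ∧ (Nat.digitChar d).toNat = 48 + d := by
  interval_cases d <;> exact ⟨by decide, by decide, by decide⟩

theorem pvSpecDigits_digits (n : Nat) : ∀ c ∈ pvSpecDigits n, '0' ≤ c ∧ c ≤ '9' := by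
  induction n using pvSpecDigits.induct with
  | case1 n h =>
    rw [pvSpecDigits, dif_pos h]
    intro c hc
    simp at hc
    subst hc
    exact ⟨(pvDigitChar_facts n h).1, (pvDigitChar_facts n h).2.1⟩
  | case2 n h ih =>
    rw [pvSpecDigits, dif_neg h]
    intro c hc
    rcases List.mem_append.mp hc with h1 | h2
    · exact ih c h1
    · simp at h2
      subst h2
      have hm : n % 10 < 10 := Nat.mod_lt _ (by omega)
      exact ⟨(pvDigitChar_facts _ hm).1, (pvDigitChar_facts _ hm).2.1⟩

theorem pvSpecDigits_ne_nil (n : Nat) : pvSpecDigits n ≠ [] := by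
  rw [pvSpecDigits]
  split <;> simp

theorem pvSpecDigits_val (n : Nat) : pvIntOfDigits (pvSpecDigits n) = n := by
  rw [pvIntOfDigits]
  induction n using pvSpecDigits.induct with
  | case1 n h =>
    rw [pvSpecDigits, dif_pos h]
    simp [(pvDigitChar_facts n h).2.2]
  | case2 n h ih =>
    rw [pvSpecDigits, dif_neg h]
    rw [List.foldl_append, ih]
    have hm : n % 10 < 10 := Nat.mod_lt _ (by omega)
    simp only [List.foldl_cons, List.foldl_nil, (pvDigitChar_facts _ hm).2.2]
    push_cast
    omega

theorem pvSpecDigits_head_ne_zero (n : Nat) (hn : 1 ≤ n) : ∀ t, pvSpecDigits n ≠ '0' :: t := by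
  induction n using pvSpecDigits.induct with
  | case1 n h =>
    intro t hc
    rw [pvSpecDigits, dif_pos h] at hc
    have ht : Nat.digitChar n = '0' := by
      have := List.cons.injEq (Nat.digitChar n) [] '0' t ▸ hc
      exact (List.cons_eq_cons.mp hc).1
    have := (pvDigitChar_facts n h).2.2
    rw [ht] at this
    simp at this
    omega
  | case2 n h ih =>
    intro t hc
    rw [pvSpecDigits, dif_neg h] at hc
    have hge : 1 ≤ n / 10 := by omega
    rcases hd : pvSpecDigits (n / 10) with _ | ⟨a, l⟩
    · exact pvSpecDigits_ne_nil _ hd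
    · rw [hd] at hc
      simp only [List.cons_append] at hc
      have ha : a = '0' := (List.cons_eq_cons.mp hc).1
      exact ih hge l (by rw [hd, ha])

/- ---------- digit characters ---------- -/

theorem pvCharToNat_bounds (c : Char) (h1 : '0' ≤ c) (h2 : c ≤ '9') :
    48 ≤ c.toNat ∧ c.toNat ≤ 57 := by
  constructor
  · simpa [Char.le_def, UInt32.le_iff_toNat_le] using h1
  · simpa [Char.le_def, UInt32.le_iff_toNat_le] using h2

theorem pvDigitChar_of_digit (c : Char) (h1 : '0' ≤ c) (h2 : c ≤ '9') :
    Nat.digitChar (c.toNat - 48) = c := by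
  obtain ⟨hl, hr⟩ := pvCharToNat_bounds c h1 h2
  have hd : c.toNat - 48 < 10 := by omega
  have h48 : (Nat.digitChar (c.toNat - 48)).toNat = c.toNat := by
    rw [(pvDigitChar_facts _ hd).2.2]; omega
  calc Nat.digitChar (c.toNat - 48)
      = Char.ofNat (Nat.digitChar (c.toNat - 48)).toNat := (Char.ofNat_toNat _).symm
    _ = Char.ofNat c.toNat := by rw [h48]
    _ = c := Char.ofNat_toNat c

/- ---------- canonical digit strings round-trip ---------- -/

theorem pvCanon : ∀ ds : List Char, ds ≠ [] → (∀ c ∈ ds, '0' ≤ c ∧ c ≤ '9') →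
    (∀ t, ds ≠ '0' :: t) →
    1 ≤ pvIntOfDigits ds ∧ pvSpecDigits (pvIntOfDigits ds).toNat = ds := by
  intro ds
  induction ds using List.reverseRecOn with
  | nil => intro h; exact absurd rfl h
  | append_singleton ds c ih =>
    intro _ hdig hhd
    have hc := hdig c (by simp)
    obtain ⟨hcl, hcr⟩ := pvCharToNat_bounds c hc.1 hc.2
    by_cases hdse : ds = []
    · -- single digit c, c ≠ '0'
      subst hdse
      have hc0 : c ≠ '0' := by
        intro hc0; exact hhd [] (by rw [hc0]; rfl)
      have hc48 : c.toNat ≠ 48 := by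
        intro he
        exact hc0 (by
          calc c = Char.ofNat c.toNat := (Char.ofNat_toNat c).symm
            _ = Char.ofNat 48 := by rw [he]
            _ = '0' := rfl)
      have hv' : pvIntOfDigits [c] = (c.toNat : Int) - 48 := by simp [pvIntOfDigits]
      refine ⟨by rw [List.nil_append, hv']; omega, ?_⟩
      rw [List.nil_append, hv']
      have ht : ((c.toNat : Int) - 48).toNat = c.toNat - 48 := by omega
      rw [ht, pvSpecDigits, dif_pos (by omega), pvDigitChar_of_digit c hc.1 hc.2]
    · -- ds nonempty: peel the last digit
      have hne : ds ≠ [] := hdse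
      have hdig' : ∀ x ∈ ds, '0' ≤ x ∧ x ≤ '9' := fun x hx => hdig x (by simp [hx])
      have hhd' : ∀ t, ds ≠ '0' :: t := by
        intro t hct
        exact hhd (t ++ [c]) (by rw [hct]; simp)
      obtain ⟨hv1, hsd⟩ := ih hne hdig' hhd'
      have hsnoc : pvIntOfDigits (ds ++ [c]) = 10 * pvIntOfDigits ds + ((c.toNat : Int) - 48) := by
        simp [pvIntOfDigits, List.foldl_append]
      set v := pvIntOfDigits ds with hvdef
      refine ⟨by rw [hsnoc]; omega, ?_⟩
      rw [hsnoc]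
      have hnat : (10 * v + ((c.toNat : Int) - 48)).toNat = 10 * v.toNat + (c.toNat - 48) := by
        omega
      rw [hnat]
      have h10 : ¬ 10 * v.toNat + (c.toNat - 48) < 10 := by omega
      rw [pvSpecDigits, dif_neg h10]
      have hdiv : (10 * v.toNat + (c.toNat - 48)) / 10 = v.toNat := by omega
      have hmod : (10 * v.toNat + (c.toNat - 48)) % 10 = c.toNat - 48 := by omega
      rw [hdiv, hmod, hsd, pvDigitChar_of_digit c hc.1 hc.2]

/- ---------- the parse ↔ key correspondence ---------- -/

theorem pvKey_toList (i : Int) : (pvKey i).toList = "attempt_".toList ++ PySem.Int.toChars i := by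
  rw [pvKey]
  simp [PySem.Int.toList_toStr]

theorem pvToChars_nonneg (m : Int) (h : ¬ m < 0) :
    PySem.Int.toChars m = pvSpecDigits m.toNat := by
  rw [PySem.Int.toChars, if_neg h, pvToDigits_eq]

theorem pvSlice8 (k : String) : (PySem.Str.slice k (some 8) none).toList = k.toList.drop 8 := by
  rw [PySem.Str.toList_slice]
  have := PySem.List.slice_from (xs := k.toList) (a := (8:Int)) (by omega)
  simpa [PySem.Chars.slice] using this

theorem pvStartswithZero_iff (s : String) :
    PySem.Str.startswith s "0" = true ↔ ∃ t, s.toList = '0' :: t := by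
  rw [PySem.Str.startswith_eq]
  constructor
  · intro h
    obtain ⟨t, ht⟩ := (PySem.Chars.startswith_iff _ _).mp h
    exact ⟨t, by simpa using ht.symm⟩
  · rintro ⟨t, ht⟩
    rw [PySem.Chars.startswith_iff, ht]
    simp

-- parsing the rendered key of a positive attempt number gives it back
theorem pvParse_key (m : Int) (hm : 1 ≤ m) : pvAttemptNumber (pvKey m) = some m := by
  have hsw : PySem.Str.startswith (pvKey m) "attempt_" = true := by
    rw [PySem.Str.startswith_eq, PySem.Chars.startswith_iff, pvKey_toList]
    exact List.prefix_append _ _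
  have hsl : (PySem.Str.slice (pvKey m) (some 8) none).toList = pvSpecDigits m.toNat := by
    rw [pvSlice8, pvKey_toList]
    have h8 : ("attempt_".toList).length = 8 := by decide
    rw [← h8, List.drop_left, pvToChars_nonneg m (by omega)]
  have hdig : PySem.Str.strIsdigit (PySem.Str.slice (pvKey m) (some 8) none) = true := by
    rw [PySem.Str.strIsdigit_eq, PySem.Chars.strIsdigit, hsl]
    have h1 : (pvSpecDigits m.toNat).isEmpty = false := by
      rw [List.isEmpty_eq_false_iff]; exact pvSpecDigits_ne_nil _
    rw [h1]
    simp only [Bool.not_false, Bool.true_and, List.all_eq_true]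
    intro c hc
    have := pvSpecDigits_digits _ c hc
    simp [PySem.Chars.isdigit, this.1, this.2]
  have hz : ¬ PySem.Str.startswith (PySem.Str.slice (pvKey m) (some 8) none) "0" = true := by
    intro hT
    obtain ⟨t, ht⟩ := (pvStartswithZero_iff _).mp hT
    rw [hsl] at ht
    exact pvSpecDigits_head_ne_zero m.toNat (by omega) t ht
  rw [pvAttemptNumber, if_pos hsw]
  simp only
  rw [if_neg (by push_neg; exact ⟨hdig, hz⟩)]
  rw [hsl, pvSpecDigits_val]
  exact congrArg some (by omega)

theorem pvParse_some (k : String) (m : Int) (h : pvAttemptNumber k = some m) :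
    1 ≤ m ∧ k = pvKey m := by
  rw [pvAttemptNumber] at h
  by_cases hsw : PySem.Str.startswith k "attempt_" = true
  · rw [if_pos hsw] at h
    simp only at h
    obtain ⟨t, ht⟩ : "attempt_".toList <+: k.toList := by
      rw [PySem.Str.startswith_eq, PySem.Chars.startswith_iff] at hsw
      exact hsw
    have hs : (PySem.Str.slice k (some 8) none).toList = t := by
      rw [pvSlice8, ← ht]
      have h8 : ("attempt_".toList).length = 8 := by decide
      rw [← h8, List.drop_left]
    by_cases hg : ¬ (PySem.Str.strIsdigit (PySem.Str.slice k (some 8) none) = true) ∨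
        PySem.Str.startswith (PySem.Str.slice k (some 8) none) "0" = true
    · rw [if_pos hg] at h; cases h
    · rw [if_neg hg] at h
      push_neg at hg
      obtain ⟨hdig, hz⟩ := hg
      rw [PySem.Str.strIsdigit_eq, PySem.Chars.strIsdigit, hs] at hdig
      have hne : t ≠ [] := by
        intro hc
        rw [hc] at hdig
        simp at hdig
      have hall : ∀ c ∈ t, '0' ≤ c ∧ c ≤ '9' := by
        intro c hc
        have := (Bool.and_eq_true _ _).mp hdig |>.2
        rw [List.all_eq_true] at this
        have := this c hc
        simpa [PySem.Chars.isdigit] using this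
      have hhd : ∀ l, t ≠ '0' :: l := by
        intro l hc
        exact hz ((pvStartswithZero_iff _).mpr ⟨l, by rw [hs, hc]⟩)
      obtain ⟨hv1, hsd⟩ := pvCanon t hne hall hhd
      have hm : m = pvIntOfDigits t := by
        rw [hs] at h
        exact (Option.some_inj.mp h).symm
      subst hm
      refine ⟨hv1, ?_⟩
      rw [← String.toList_inj, pvKey_toList, ← ht, pvToChars_nonneg _ (by omega), hsd]
  · rw [if_neg hsw] at h; cases h

/- ---------- B: the scan computes the first-occurrence argmax ---------- -/

def pvCombine (b : Int × String) (r : Option (Int × String)) : Option (Int × String) :=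
  match r with
  | none => some b
  | some (M, w) => if b.1 < M then some (M, w) else some b

def pvS (n : Int) : List (String × String) → Option (Int × String)
  | [] => none
  | (k, v) :: rest =>
    match pvAttemptNumber k with
    | none => pvS n rest
    | some m =>
      if 1 ≤ m ∧ m ≤ n then pvCombine (m, v) (pvS n rest)
      else pvS n rest

theorem pvBLoop_eq (n : Int) (l : List (String × String)) :
    ∀ (bn : Int) (bh : Option String), 0 ≤ bn →
      pvBLoop n l (bn, bh) =
        match pvS n l with
        | none => (bn, bh)
        | some (M, w) => if bn < M then (M, some w) else (bn, bh) := by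
  induction l with
  | nil => intro bn bh _; simp [pvBLoop, pvS]
  | cons kv rest ih =>
    intro bn bh hbn
    rcases kv with ⟨k, v⟩
    rw [pvBLoop, pvS]
    rcases hp : pvAttemptNumber k with _ | m
    · simp only [ih bn bh hbn]
    · dsimp only
      by_cases hq : 1 ≤ m ∧ m ≤ n
      · rw [if_pos hq]
        by_cases hlt : bn < m
        · rw [if_pos ⟨hlt, hq.2⟩, ih m (some v) (by omega)]
          rcases hS : pvS n rest with _ | ⟨M, w⟩
          · simp [pvCombine, hlt]
          · by_cases hmM : m < M
            · simp [pvCombine, hmM, show bn < M by omega]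
            · simp [pvCombine, hmM, hlt]
        · rw [if_neg (by tauto), ih bn bh hbn]
          rcases hS : pvS n rest with _ | ⟨M, w⟩
          · simp [pvCombine, hlt]
          · by_cases hmM : m < M
            · simp [pvCombine, hmM]
            · simp [pvCombine, hmM, hlt, show ¬ bn < M by omega]
      · rw [if_neg hq, if_neg (by rintro ⟨h1, h2⟩; exact hq ⟨by omega, h2⟩), ih bn bh hbn]

theorem pvS_none_of_lt_one (n : Int) (hn : n < 1) (l : List (String × String)) :
    pvS n l = none := by
  induction l with
  | nil => rfl
  | cons kv rest ih =>
    rcases kv with ⟨k, v⟩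
    rw [pvS]
    rcases hp : pvAttemptNumber k with _ | m
    · exact ih
    · dsimp only
      rw [if_neg (by rintro ⟨h1, h2⟩; omega)]
      exact ih

/- ---------- the argmax invariant ---------- -/

theorem pvLookup_cons_self {k a : String} (v : String) (rest : List (String × String)) (h : a = k) :
    List.lookup a ((k, v) :: rest) = some v := by simp [h]

theorem pvLookup_cons_ne {k a : String} (v : String) (rest : List (String × String)) (h : a ≠ k) :
    List.lookup a ((k, v) :: rest) = List.lookup a rest := by
  simp only [List.lookup_cons]
  rw [beq_eq_false_iff_ne.mpr h]

theorem pvSpecDigits_inj {a b : Nat} (h : pvSpecDigits a = pvSpecDigits b) : a = b := by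
  have ha := pvSpecDigits_val a
  rw [h, pvSpecDigits_val b] at ha
  exact_mod_cast ha.symm

theorem pvToChars_inj {i j : Int} (h : PySem.Int.toChars i = PySem.Int.toChars j) : i = j := by
  have hdash : ∀ n : Nat, ∀ t, pvSpecDigits n ≠ '-' :: t := by
    intro n t hc
    have := pvSpecDigits_digits n '-' (by rw [hc]; simp)
    exact absurd this.1 (by decide)
  by_cases hi : i < 0 <;> by_cases hj : j < 0
  · rw [PySem.Int.toChars, if_pos hi, PySem.Int.toChars, if_pos hj,
      pvToDigits_eq, pvToDigits_eq] at h
    have := pvSpecDigits_inj (List.cons_eq_cons.mp h).2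
    omega
  · rw [PySem.Int.toChars, if_pos hi, pvToDigits_eq, pvToChars_nonneg j hj] at h
    exact absurd h.symm (hdash _ _)
  · rw [pvToChars_nonneg i hi, PySem.Int.toChars, if_pos hj, pvToDigits_eq] at h
    exact absurd h (hdash _ _)
  · rw [pvToChars_nonneg i hi, pvToChars_nonneg j hj] at h
    have := pvSpecDigits_inj h
    omega

theorem pvKey_inj_pos {i j : Int} (_hi : 1 ≤ i) (h : pvKey i = pvKey j) : i = j := by
  have hl : (pvKey i).toList = (pvKey j).toList := by rw [h]
  rw [pvKey_toList, pvKey_toList] at hl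
  exact pvToChars_inj (List.append_cancel_left hl)

theorem pvS_spec (n : Int) (hints : List (String × String)) :
    (pvS n hints = none → ∀ i : Int, 1 ≤ i → i ≤ n → hints.lookup (pvKey i) = none) ∧
    (∀ M w, pvS n hints = some (M, w) →
      (1 ≤ M ∧ M ≤ n) ∧ hints.lookup (pvKey M) = some w ∧
      ∀ i : Int, 1 ≤ i → i ≤ n → M < i → hints.lookup (pvKey i) = none) := by
  induction hints with
  | nil =>
    refine ⟨fun _ i _ _ => rfl, fun M w h => by simp [pvS] at h⟩
  | cons kv rest ih =>
    rcases kv with ⟨k, v⟩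
    rcases hp : pvAttemptNumber k with _ | m
    · -- key is not a canonical attempt_N key: it never collides with pvKey i (i ≥ 1)
      have hne : ∀ i : Int, 1 ≤ i → pvKey i ≠ k := by
        intro i hi he
        rw [← he, pvParse_key i hi] at hp
        cases hp
      have hS : pvS n ((k, v) :: rest) = pvS n rest := by simp only [pvS, hp]
      rw [hS]
      refine ⟨fun h0 i hi1 hin => ?_, fun M w h0 => ?_⟩
      · rw [pvLookup_cons_ne v rest (hne i hi1)]; exact ih.1 h0 i hi1 hin
      · obtain ⟨h1, h2, h3⟩ := ih.2 M w h0
        exact ⟨h1, by rw [pvLookup_cons_ne v rest (hne M h1.1)]; exact h2,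
          fun i hi1 hin hlt => by rw [pvLookup_cons_ne v rest (hne i hi1)]; exact h3 i hi1 hin hlt⟩
    · obtain ⟨hm1, hk⟩ := pvParse_some k m hp
      subst hk
      have hne : ∀ i : Int, 1 ≤ i → i ≠ m → pvKey i ≠ pvKey m := by
        intro i hi1 hi hc
        exact hi (pvKey_inj_pos hi1 hc)
      by_cases hq : 1 ≤ m ∧ m ≤ n
      · have hS : pvS n ((pvKey m, v) :: rest) = pvCombine (m, v) (pvS n rest) := by
          simp only [pvS, hp, if_pos hq]
        rw [hS]
        rcases hrest : pvS n rest with _ | ⟨M, w⟩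
        · -- rest has nothing qualifying; the new key is the argmax
          refine ⟨fun h0 => by simp [pvCombine] at h0, fun M' w' h0 => ?_⟩
          simp only [pvCombine, Option.some.injEq, Prod.mk.injEq] at h0
          obtain ⟨rfl, rfl⟩ := h0
          refine ⟨hq, pvLookup_cons_self v rest rfl, fun i hi1 hin hlt => ?_⟩
          rw [pvLookup_cons_ne v rest (hne i hi1 (by omega))]
          exact ih.1 hrest i hi1 hin
        · obtain ⟨hQ, hfound, habove⟩ := ih.2 M w hrest
          refine ⟨fun h0 => ?_, fun M' w' h0 => ?_⟩
          · simp only [pvCombine] at h0; split_ifs at h0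
          · simp only [pvCombine] at h0
            by_cases hlt : m < M
            · rw [if_pos hlt] at h0
              simp only [Option.some.injEq, Prod.mk.injEq] at h0
              obtain ⟨rfl, rfl⟩ := h0
              refine ⟨hQ, by rw [pvLookup_cons_ne v rest (hne M hQ.1 (by omega))]; exact hfound,
                fun i hi1 hin hi => ?_⟩
              rw [pvLookup_cons_ne v rest (hne i hi1 (by omega))]
              exact habove i hi1 hin hi
            · rw [if_neg hlt] at h0
              simp only [Option.some.injEq, Prod.mk.injEq] at h0
              obtain ⟨rfl, rfl⟩ := h0
              refine ⟨hq, pvLookup_cons_self v rest rfl, fun i hi1 hin hi => ?_⟩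
              rw [pvLookup_cons_ne v rest (hne i hi1 (by omega))]
              exact habove i hi1 hin (by omega)
      · have hS : pvS n ((pvKey m, v) :: rest) = pvS n rest := by
          simp only [pvS, hp, if_neg hq]
        rw [hS]
        have hnei : ∀ i : Int, 1 ≤ i → i ≤ n → pvKey i ≠ pvKey m := by
          intro i hi1 hin
          exact hne i hi1 (by rintro rfl; exact hq ⟨hi1, hin⟩)
        refine ⟨fun h0 i hi1 hin => ?_, fun M w h0 => ?_⟩
        · rw [pvLookup_cons_ne v rest (hnei i hi1 hin)]; exact ih.1 h0 i hi1 hin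
        · obtain ⟨h1, h2, h3⟩ := ih.2 M w h0
          exact ⟨h1, by rw [pvLookup_cons_ne v rest (hnei M h1.1 h1.2)]; exact h2,
            fun i hi1 hin hlt => by rw [pvLookup_cons_ne v rest (hnei i hi1 hin)]; exact h3 i hi1 hin hlt⟩

/- ---------- A: the descending probe finds the argmax ---------- -/

theorem pvALoop_none (hints : List (String × String)) (l : List Int)
    (h : ∀ i ∈ l, hints.lookup (pvKey i) = none) : pvALoop hints l = none := by
  induction l with
  | nil => rfl
  | cons i rest ih =>
    rw [pvALoop, h i (by simp)]
    exact ih (fun j hj => h j (by simp [hj]))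

theorem pvALoop_find (hints : List (String × String)) (n M : Int) (w : String)
    (hM1 : 1 ≤ M) (hMn : M ≤ n)
    (hfound : hints.lookup (pvKey M) = some w)
    (habove : ∀ i : Int, 1 ≤ i → i ≤ n → M < i → hints.lookup (pvKey i) = none) :
    ∀ (k : Nat) (a : Int), a = M + k → a ≤ n → pvALoop hints (PySem.List.pyRange a 0 (-1)) = some w := by
  intro k
  induction k with
  | zero =>
    intro a ha _
    have ha' : a = M := by omega
    subst ha'
    rw [PySem.List.pyRange_neg_one_cons (by omega), pvALoop, hfound]
  | succ k ih =>
    intro a ha han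
    have h0 : (0:Int) < a := by omega
    rw [PySem.List.pyRange_neg_one_cons h0, pvALoop,
      habove a (by omega) han (by omega)]
    exact ih (a - 1) (by omega) (by omega)

/- ---------- main theorem ---------- -/

theorem pv_main (hints : List (String × String)) (n : Int)
    (hnD : ¬ D_get_hint_for_attempt hints n) :
    get_hint_for_attempt hints n = get_hint_for_attempt_alt hints n := by
  rw [get_hint_for_attempt.eq_def, get_hint_for_attempt_alt.eq_def]
  by_cases hnil : hints = []
  · simp [hnil]
  · simp only [if_neg hnil]
    rw [pvBLoop_eq n hints 0 none (by omega)]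
    by_cases h1 : 1 ≤ n
    · -- documented domain: full equivalence
      rcases hS : pvS n hints with _ | ⟨M, w⟩
      · dsimp only
        have hnone := (pvS_spec n hints).1 hS
        rw [hnone n (by omega) (by omega)]
        rw [pvALoop_none hints _ (fun i hi => by
          have := PySem.List.mem_pyRange_neg_one.mp hi
          exact hnone i (by omega) (by omega))]
      · dsimp only
        obtain ⟨hQ, hfound, habove⟩ := (pvS_spec n hints).2 M w hS
        rw [if_pos (by omega : (0:Int) < M)]
        by_cases hMeq : M = n
        · subst hMeq
          rw [hfound]
        · have hlt : M < n := by omega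
          rw [habove n (by omega) (by omega) hlt]
          rw [pvALoop_find hints n M w hQ.1 hQ.2 hfound habove (n - M).toNat n (by omega) (by omega)]
    · -- non-positive attempt number: both sides fall back to the first hint (outside D_)
      rw [pvS_none_of_lt_one n (by omega) hints]
      dsimp only
      rcases hhints : hints with _ | ⟨⟨k0, v0⟩, rest⟩
      · exact absurd hhints hnil
      · rcases hlk : List.lookup (pvKey n) ((k0, v0) :: rest) with _ | v
        · rw [PySem.List.pyRange_neg_one_eq_nil (by omega : n ≤ 0), pvALoop]
        · -- A hits the exact key; ¬D_ forces its hint to be the dict's first hint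
          have hvv : v = v0 := by
            rw [D_get_hint_for_attempt] at hnD
            push_neg at hnD
            have := hnD (by omega) (by rw [show ("attempt_" ++ PySem.Int.toStr n) = pvKey n from rfl, hhints, hlk]; rfl)
            rw [show ("attempt_" ++ PySem.Int.toStr n) = pvKey n from rfl, hhints, hlk] at this
            simpa using this
          rw [hvv]

-- ===== VERDICT (by name: the statements are the Claim_ definitions above) =====
theorem get_hint_for_attempt_spec : Claim_unchanged_get_hint_for_attempt := by
  intro hints attempt_number _ hnD
  exact pv_main hints attempt_number hnD

theorem get_hint_for_attempt_changed : Claim_changed_get_hint_for_attempt := by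
  unfold Claim_changed_get_hint_for_attempt; decide

theorem get_hint_for_attempt_tight : Claim_exact_get_hint_for_attempt := by
  intro hints n _ hD
  obtain ⟨hn1, hsome, hneq⟩ := hD
  obtain ⟨v, hv⟩ := Option.isSome_iff_exists.mp hsome
  have hnil : hints ≠ [] := by
    rintro rfl
    simp at hv
  rcases hhints : hints with _ | ⟨⟨k0, v0⟩, rest⟩
  · exact absurd hhints hnil
  · subst hhints
    have hA : get_hint_for_attempt ((k0, v0) :: rest) n = v := by
      rw [get_hint_for_attempt.eq_def, if_neg hnil]
      rw [show pvKey n = ("attempt_" ++ PySem.Int.toStr n) from rfl, hv]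
    have hB : get_hint_for_attempt_alt ((k0, v0) :: rest) n = v0 := by
      rw [get_hint_for_attempt_alt.eq_def, if_neg hnil,
        pvBLoop_eq n _ 0 none (by omega), pvS_none_of_lt_one n (by omega)]
    rw [hA, hB]
    intro hc
    subst hc
    rw [hv] at hneq
    simp at hneq
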